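-- pv_equiv track=rewrite | github.com/Dodamon/Baekjoon | 프로그래머스/lv3/64062. 징검다리 건너기/징검다리 건너기.py | solution
-- ===== SOURCE A (Python) =====
-- def solution(stones, k):
--
--     if k == 1:
--         return min(stones)
--     if k == len(stones):
--         return max(stones)
--
--     answer = 0
--     l = []
--     for i, num in enumerate(stones):
--         l.append((i, num))
--     l.sort(key = lambda x: x[1])
--
--     before = [x for x in range(-1, len(stones)-1)]
--     after = [x for x in range(1, len(stones)+1)]
--
--     # 돌이 하나씩 사라진다
--     for i, stone in l:
--         if after[i] - before[i] - 1 >= k: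
--             answer = stone
--             break
--
--         if before[i] == -1:
--             before[after[i]] = before[i]
--         elif after[i] == len(stones):
--             after[before[i]] = after[i]
--         else:
--             after[before[i]] = after[i]
--             before[after[i]] = before[i]
--
--     return answer
-- ===== SOURCE B (Python) =====
-- def solution(stones, k):
--     if k <= 1:
--         return min(stones)
--     return min(max(stones[i:i + k]) for i in range(len(stones) - k + 1))
-- ===== Notes on version B (the rewrite author's own statement) =====
-- stated objective: simpler
-- what changed: B replaces A's sort-by-value stone-removal simulation with linked-list before/after pointer arrays by a direct computation: the minimum over all k-windows of the window maximum (with min(stones) for degenerate k <= 1).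
-- outside the precondition, e.g. on solution([], 5): A returns 0, B raises ValueError
import Mathlib
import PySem

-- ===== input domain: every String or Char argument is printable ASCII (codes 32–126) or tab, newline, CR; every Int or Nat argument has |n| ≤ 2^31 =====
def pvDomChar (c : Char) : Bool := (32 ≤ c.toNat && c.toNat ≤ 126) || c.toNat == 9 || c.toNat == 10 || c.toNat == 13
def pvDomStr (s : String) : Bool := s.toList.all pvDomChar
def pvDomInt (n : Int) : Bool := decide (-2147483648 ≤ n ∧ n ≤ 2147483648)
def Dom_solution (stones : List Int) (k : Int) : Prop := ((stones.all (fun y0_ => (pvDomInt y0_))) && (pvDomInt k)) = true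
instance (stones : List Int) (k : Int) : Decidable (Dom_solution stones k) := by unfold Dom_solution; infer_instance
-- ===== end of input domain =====

-- B replaces A's sort-by-value removal simulation by the direct minimum over all
-- k-windows of the window maximum (objective: simpler).

-- ===== PORT A =====
-- the 'for i, stone in l: … break …' loop (break = return the stone, loop end = answer 0)
def solutionLoop (k n : Int) : List (Int × Int) → List Int → List Int → Int
  | [], _, _ => 0
  | (i, stone) :: rest, before, after =>
    let bi := PySem.List.pyGetD before i 0
    let ai := PySem.List.pyGetD after i 0
    if ai - bi - 1 ≥ k then stone
    else if bi = -1 then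
      solutionLoop k n rest (PySem.List.pySetD before ai bi) after
    else if ai = n then
      solutionLoop k n rest before (PySem.List.pySetD after bi ai)
    else
      solutionLoop k n rest (PySem.List.pySetD before ai bi) (PySem.List.pySetD after bi ai)

def solution (stones : List Int) (k : Int) : Int :=
  if k = 1 then (PySem.List.min? stones (fun x => x)).getD 0
  else if k = (stones.length : Int) then (PySem.List.max? stones (fun x => x)).getD 0
  else
    let l := (PySem.List.enumerate stones 0).foldl (fun acc p => acc ++ [p]) []
    let ls := PySem.List.sorted l (fun p => p.2) false
    let before := PySem.List.pyRange (-1) ((stones.length : Int) - 1) 1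
    let after := PySem.List.pyRange 1 ((stones.length : Int) + 1) 1
    solutionLoop k (stones.length : Int) ls before after

-- ===== PORT B =====
def solution_alt (stones : List Int) (k : Int) : Int :=
  if k ≤ 1 then (PySem.List.min? stones (fun x => x)).getD 0
  else
  (PySem.List.min?
    ((PySem.List.pyRange 0 ((stones.length : Int) - k + 1) 1).map
      (fun i => (PySem.List.max? (PySem.List.slice stones (some i) (some (i + k))) (fun x => x)).getD 0))
    (fun x => x)).getD 0

-- ===== PRECONDITION & SPEC =====
-- Pre_ excludes the inputs on which A raises (k > len(stones): IndexError on the pointer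
-- arrays; empty stones with k in {0,1}: min()/max() of an empty sequence) and the empty-stones
-- inputs with other k, where A returns the leftover answer 0 while B's natural min-over-windows
-- raises ValueError.
def Pre_solution (stones : List Int) (k : Int) : Prop :=
  stones ≠ [] ∧ k ≤ (stones.length : Int)
instance (stones : List Int) (k : Int) : Decidable (Pre_solution stones k) := by
  unfold Pre_solution; infer_instance

def pvWitness_solution : List Int × Int := ([2, 4, 5, 3, 2, 1, 4, 2, 5, 1], 3)

def Spec_solution (stones : List Int) (k : Int) (out : Int) : Prop := out = solution_alt stones k
instance (stones : List Int) (k : Int) (out : Int) : Decidable (Spec_solution stones k out) := by unfold Spec_solution; infer_instance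

-- ===== CLAIM (what is proved, stated in full; the proofs are below) =====
def Claim_equal_solution : Prop := ∀ (stones : List Int) (k : Int), Dom_solution stones k → Pre_solution stones k → Spec_solution stones k (solution stones k)

-- ===== LEMMAS AND PROOFS =====

-- value of stones at (in-range) integer position m
def sval (stones : List Int) (m : Int) : Int := PySem.List.pyGetD stones m 0

-- "x is the nearest index < j outside S (or -1)"
def IsLF (S : List Int) (j x : Int) : Prop :=
  -1 ≤ x ∧ x < j ∧ x ∉ S ∧ ∀ m, x < m → m < j → m ∈ S

-- "x is the nearest index > j outside S (or n)"
def IsRF (S : List Int) (n j x : Int) : Prop :=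
  j < x ∧ x ≤ n ∧ x ∉ S ∧ ∀ m, j < m → m < x → m ∈ S

-- the before/after arrays are correct for every still-unremoved index
def LLInv (S before after : List Int) (n : Int) : Prop :=
  ∀ j : Int, 0 ≤ j → j < n → j ∉ S →
    IsLF S j (PySem.List.pyGetD before j 0) ∧ IsRF S n j (PySem.List.pyGetD after j 0)

-- "S contains k consecutive indices inside [0, n)"
def HasWin (S : List Int) (n k : Int) : Prop :=
  ∃ w, 0 ≤ w ∧ w + k ≤ n ∧ ∀ m, w ≤ m → m < w + k → m ∈ S



theorem getD_setD (xs : List Int) (i j v : Int) (h0i : 0 ≤ i) (hi : i < (xs.length : Int))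
    (h0j : 0 ≤ j) (hj : j < (xs.length : Int)) :
    PySem.List.pyGetD (PySem.List.pySetD xs i v) j 0 =
      if j = i then v else PySem.List.pyGetD xs j 0 := by
  rw [PySem.List.pySetD_of_nonneg xs v h0i,
      PySem.List.pyGetD_eq_getElem (xs := xs.set i.toNat v) _ h0j (by simpa using hj),
      List.getElem_set]
  by_cases h : j = i
  · subst h; simp
  · rw [if_neg (by omega), if_neg h,
      PySem.List.pyGetD_eq_getElem _ _ h0j (by simpa using hj)]

theorem slice_eq_map (xs : List Int) (a b : Int) (h0 : 0 ≤ a) (hab : a ≤ b)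
    (hb : b ≤ (xs.length : Int)) :
    PySem.List.slice xs (some a) (some b) =
      (PySem.List.pyRange a b 1).map (fun m => PySem.List.pyGetD xs m 0) := by
  rw [PySem.List.slice_toNat xs h0 (le_trans h0 hab), PySem.List.pyRange_one]
  apply List.ext_getElem
  · simp; omega
  · intro idx h1 h2
    simp only [List.length_take, List.length_drop, lt_min_iff] at h1
    simp only [List.getElem_take, List.getElem_drop, List.getElem_map, List.getElem_range]
    rw [PySem.List.pyGetD_eq_getElem _ _ (by omega) (by omega)]
    congr 1
    omega

theorem windowMax_spec (stones : List Int) (k a : Int) (hk : 1 ≤ k) (h0 : 0 ≤ a)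
    (hb : a + k ≤ (stones.length : Int)) :
    (∃ m, a ≤ m ∧ m < a + k ∧ sval stones m =
        (PySem.List.max? (PySem.List.slice stones (some a) (some (a + k))) (fun x => x)).getD 0) ∧
    (∀ m, a ≤ m → m < a + k → sval stones m ≤
        (PySem.List.max? (PySem.List.slice stones (some a) (some (a + k))) (fun x => x)).getD 0) := by
  rw [slice_eq_map stones a (a + k) h0 (by omega) hb]
  set sl := (PySem.List.pyRange a (a + k) 1).map (fun m => PySem.List.pyGetD stones m 0) with hsl
  have hne : sl ≠ [] := by
    have : (a : Int) ∈ PySem.List.pyRange a (a + k) 1 := PySem.List.mem_pyRange_one.mpr ⟨le_refl _, by omega⟩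
    intro h
    rw [hsl] at h
    simp only [List.map_eq_nil_iff] at h
    rw [h] at this
    simp at this
  obtain ⟨mu, hmu⟩ : ∃ mu, PySem.List.max? sl (fun x => x) = some mu := by
    cases h : PySem.List.max? sl (fun x => x) with
    | none => exact absurd ((PySem.List.max?_eq_none_iff _ _).mp h) hne
    | some mu => exact ⟨mu, rfl⟩
  rw [hmu]
  simp only [Option.getD_some]
  constructor
  · have := PySem.List.max?_mem hmu
    rw [hsl] at this
    obtain ⟨m, hm, hval⟩ := List.mem_map.mp this
    obtain ⟨hm1, hm2⟩ := PySem.List.mem_pyRange_one.mp hm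
    exact ⟨m, hm1, hm2, hval⟩
  · intro m h1 h2
    have hmem : sval stones m ∈ sl := by
      rw [hsl]
      exact List.mem_map.mpr ⟨m, PySem.List.mem_pyRange_one.mpr ⟨h1, h2⟩, rfl⟩
    exact PySem.List.max?_isMax hmu _ hmem

theorem alt_le (stones : List Int) (k v w : Int) (hk : 2 ≤ k) (hw0 : 0 ≤ w)
    (hwk : w + k ≤ (stones.length : Int))
    (hb : ∀ m, w ≤ m → m < w + k → sval stones m ≤ v) :
    solution_alt stones k ≤ v := by
  unfold solution_alt
  rw [if_neg (by omega)]
  set f := fun i : Int => (PySem.List.max? (PySem.List.slice stones (some i) (some (i + k))) (fun x => x)).getD 0 with hf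
  set W := (PySem.List.pyRange 0 ((stones.length : Int) - k + 1) 1).map f with hW
  have hwmem : f w ∈ W := by
    rw [hW]
    exact List.mem_map.mpr ⟨w, PySem.List.mem_pyRange_one.mpr ⟨hw0, by omega⟩, rfl⟩
  obtain ⟨M, hM⟩ : ∃ M, PySem.List.min? W (fun x => x) = some M := by
    cases h : PySem.List.min? W (fun x => x) with
    | none =>
      rw [PySem.List.min?_eq_none_iff] at h
      rw [h] at hwmem; simp at hwmem
    | some M => exact ⟨M, rfl⟩
  rw [hM]
  simp only [Option.getD_some]
  have h1 : M ≤ f w := PySem.List.min?_isMin hM _ hwmem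
  have h2 : f w ≤ v := by
    obtain ⟨⟨m, hm1, hm2, hval⟩, _⟩ := windowMax_spec stones k w (by omega) hw0 hwk
    show (PySem.List.max? (PySem.List.slice stones (some w) (some (w + k))) (fun x => x)).getD 0 ≤ v
    rw [← hval]
    exact hb m hm1 hm2
  omega

theorem alt_attained (stones : List Int) (k : Int) (hk : 2 ≤ k)
    (hkN : k ≤ (stones.length : Int)) :
    ∃ w, 0 ≤ w ∧ w + k ≤ (stones.length : Int) ∧
      (∃ m, w ≤ m ∧ m < w + k ∧ sval stones m = solution_alt stones k) ∧
      (∀ m, w ≤ m → m < w + k → sval stones m ≤ solution_alt stones k) := by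
  unfold solution_alt
  rw [if_neg (by omega)]
  set f := fun i : Int => (PySem.List.max? (PySem.List.slice stones (some i) (some (i + k))) (fun x => x)).getD 0 with hf
  set W := (PySem.List.pyRange 0 ((stones.length : Int) - k + 1) 1).map f with hW
  have h0mem : f 0 ∈ W := by
    rw [hW]
    exact List.mem_map.mpr ⟨0, PySem.List.mem_pyRange_one.mpr ⟨le_refl _, by omega⟩, rfl⟩
  obtain ⟨M, hM⟩ : ∃ M, PySem.List.min? W (fun x => x) = some M := by
    cases h : PySem.List.min? W (fun x => x) with
    | none =>
      rw [PySem.List.min?_eq_none_iff] at h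
      rw [h] at h0mem; simp at h0mem
    | some M => exact ⟨M, rfl⟩
  rw [hM]
  simp only [Option.getD_some]
  have hMW : M ∈ W := PySem.List.min?_mem hM
  rw [hW] at hMW
  obtain ⟨w, hwr, hfw⟩ := List.mem_map.mp hMW
  obtain ⟨hw0, hw1⟩ := PySem.List.mem_pyRange_one.mp hwr
  obtain ⟨hatt, hbnd⟩ := windowMax_spec stones k w (by omega) hw0 (by omega)
  have hfw' : (PySem.List.max? (PySem.List.slice stones (some w) (some (w + k))) (fun x => x)).getD 0 = M := hfw
  refine ⟨w, hw0, by omega, ?_, ?_⟩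
  · obtain ⟨m, h1, h2, h3⟩ := hatt
    exact ⟨m, h1, h2, by rw [h3]; exact hfw'⟩
  · intro m h1 h2
    have := hbnd m h1 h2
    rw [hfw'] at this
    exact this

theorem LF_update (S : List Int) (n i bi ai : Int)
    (hbi : IsLF S i bi) (hai : IsRF S n i ai)
    (j x : Int) (_hjn : j < n) (hjS : j ∉ S) (hji : j ≠ i)
    (hx : IsLF S j x) :
    IsLF (S ++ [i]) j (if j = ai then bi else x) := by
  obtain ⟨hb1, hb2, hb3, hb4⟩ := hbi
  obtain ⟨ha1, ha2, ha3, ha4⟩ := hai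
  obtain ⟨hx1, hx2, hx3, hx4⟩ := hx
  by_cases h : j = ai
  · subst h
    rw [if_pos rfl]
    refine ⟨hb1, by omega, ?_, ?_⟩
    · simp only [List.mem_append, List.mem_singleton]
      simp only [not_or]
      exact ⟨hb3, by omega⟩
    · intro m h1 h2
      simp only [List.mem_append, List.mem_singleton]
      rcases lt_trichotomy m i with h' | h' | h'
      · exact Or.inl (hb4 m h1 h')
      · exact Or.inr h'
      · exact Or.inl (ha4 m h' h2)
  · rw [if_neg h]
    have hxi : x ≠ i := by
      intro he
      subst he
      -- x = i : IsLF S j i, show j = ai, contradiction with h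
      apply h
      rcases lt_trichotomy j ai with h' | h' | h'
      · exact absurd (ha4 j hx2 h') hjS
      · exact h'
      · exact absurd (hx4 ai (by omega) h') ha3
    refine ⟨hx1, hx2, ?_, ?_⟩
    · simp only [List.mem_append, List.mem_singleton]
      simp only [not_or]
      exact ⟨hx3, hxi⟩
    · intro m h1 h2
      simp only [List.mem_append, List.mem_singleton]
      exact Or.inl (hx4 m h1 h2)

theorem RF_update (S : List Int) (n i bi ai : Int)
    (hbi : IsLF S i bi) (hai : IsRF S n i ai)
    (j y : Int) (_hj0 : 0 ≤ j) (hjS : j ∉ S) (hji : j ≠ i)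
    (hy : IsRF S n j y) :
    IsRF (S ++ [i]) n j (if j = bi then ai else y) := by
  obtain ⟨hb1, hb2, hb3, hb4⟩ := hbi
  obtain ⟨ha1, ha2, ha3, ha4⟩ := hai
  obtain ⟨hy1, hy2, hy3, hy4⟩ := hy
  by_cases h : j = bi
  · subst h
    rw [if_pos rfl]
    refine ⟨by omega, ha2, ?_, ?_⟩
    · simp only [List.mem_append, List.mem_singleton]
      simp only [not_or]
      exact ⟨ha3, by omega⟩
    · intro m h1 h2
      simp only [List.mem_append, List.mem_singleton]
      rcases lt_trichotomy m i with h' | h' | h'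
      · exact Or.inl (hb4 m h1 h')
      · exact Or.inr h'
      · exact Or.inl (ha4 m h' h2)
  · rw [if_neg h]
    have hyi : y ≠ i := by
      intro he
      subst he
      apply h
      rcases lt_trichotomy j bi with h' | h' | h'
      · exact absurd (hy4 bi h' (by omega)) hb3
      · exact h'
      · exact absurd (hb4 j h' hy1) hjS
    refine ⟨hy1, hy2, ?_, ?_⟩
    · simp only [List.mem_append, List.mem_singleton]
      simp only [not_or]
      exact ⟨hy3, hyi⟩
    · intro m h1 h2
      simp only [List.mem_append, List.mem_singleton]
      exact Or.inl (hy4 m h1 h2)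

theorem alt_kN (stones : List Int) (h2 : 2 ≤ (stones.length : Int)) :
    solution_alt stones (stones.length : Int) = (PySem.List.max? stones (fun x => x)).getD 0 := by
  unfold solution_alt
  rw [if_neg (by omega)]
  have h1 : (stones.length : Int) - (stones.length : Int) + 1 = 0 + 1 := by omega
  rw [h1, PySem.List.pyRange_one_singleton]
  have h2 : PySem.List.slice stones (some 0) (some (0 + (stones.length : Int))) = stones := by
    rw [PySem.List.slice_toNat stones (by omega) (by omega)]
    simp
  rw [List.map_singleton, h2, PySem.List.min?_id_cons]
  simp

theorem step_inv (S before after : List Int) (n i bi ai : Int) (nb na : List Int)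
    (hinv : LLInv S before after n)
    (hi0 : 0 ≤ i) (hin : i < n) (hiS : i ∉ S)
    (hbi : bi = PySem.List.pyGetD before i 0) (hai : ai = PySem.List.pyGetD after i 0)
    (hgb : ∀ j : Int, 0 ≤ j → j < n →
      PySem.List.pyGetD nb j 0 = if j = ai then bi else PySem.List.pyGetD before j 0)
    (hga : ∀ j : Int, 0 ≤ j → j < n →
      PySem.List.pyGetD na j 0 = if j = bi then ai else PySem.List.pyGetD after j 0) :
    LLInv (S ++ [i]) nb na n := by
  intro j hj0 hjn hjS'
  have hjS : j ∉ S := fun h => hjS' (List.mem_append_left _ h)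
  have hji : j ≠ i := fun h => hjS' (by simp [h])
  obtain ⟨hLj, hRj⟩ := hinv j hj0 hjn hjS
  obtain ⟨hLi, hRi⟩ := hinv i hi0 hin hiS
  rw [hgb j hj0 hjn, hga j hj0 hjn]
  exact ⟨LF_update S n i bi ai (hbi ▸ hLi) (hai ▸ hRi) j _ hjn hjS hji hLj,
         RF_update S n i bi ai (hbi ▸ hLi) (hai ▸ hRi) j _ hj0 hjS hji hRj⟩

theorem loop_eq (stones : List Int) (k : Int) (ls : List (Int × Int))
    (hk1 : 2 ≤ k) (hkN : k ≤ (stones.length : Int))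
    (hmem : ∀ pr ∈ ls, 0 ≤ pr.1 ∧ pr.1 < (stones.length : Int) ∧ pr.2 = sval stones pr.1)
    (hmem' : ∀ m : Int, 0 ≤ m → m < (stones.length : Int) → (m, sval stones m) ∈ ls)
    (hnodup : (ls.map Prod.fst).Nodup)
    (hpair : ls.Pairwise (fun a b => a.2 ≤ b.2)) :
    ∀ (r p : List (Int × Int)) (before after : List Int),
      ls = p ++ r →
      before.length = stones.length → after.length = stones.length →
      LLInv (p.map Prod.fst) before after (stones.length : Int) →
      ¬ HasWin (p.map Prod.fst) (stones.length : Int) k →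
      solutionLoop k (stones.length : Int) r before after = solution_alt stones k := by
  intro r
  induction r with
  | nil =>
    intro p before after hsplit _ _ _ hnw
    exfalso
    apply hnw
    rw [List.append_nil] at hsplit
    refine ⟨0, le_refl 0, by omega, fun m hm0 hmk => ?_⟩
    have hmm := hmem' m hm0 (by omega)
    rw [hsplit] at hmm
    exact List.mem_map.mpr ⟨(m, sval stones m), hmm, rfl⟩
  | cons hd rest ih =>
    obtain ⟨i, v⟩ := hd
    intro p before after hsplit hlb hla hinv hnw
    have hiin : (i, v) ∈ ls := by rw [hsplit]; simp
    obtain ⟨hi0, hiN, hv⟩ := hmem _ hiin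
    simp only at hi0 hiN hv
    -- i is not yet removed
    have hiS : i ∉ p.map Prod.fst := by
      intro hin
      have hnd := hnodup
      rw [hsplit, List.map_append, List.nodup_append] at hnd
      exact hnd.2.2 i hin i (by simp) rfl
    obtain ⟨hLi, hRi⟩ := hinv i hi0 hiN hiS
    set bi := PySem.List.pyGetD before i 0 with hbi
    set ai := PySem.List.pyGetD after i 0 with hai
    obtain ⟨hb1, hb2, hb3, hb4⟩ := hLi
    obtain ⟨ha1, ha2, ha3, ha4⟩ := hRi
    -- values of removed stones are ≤ v
    have hSle : ∀ m : Int, m ∈ p.map Prod.fst → sval stones m ≤ v := by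
      intro m hm
      obtain ⟨pr, hpr, hfst⟩ := List.mem_map.mp hm
      have hprls : pr ∈ ls := by rw [hsplit]; exact List.mem_append_left _ hpr
      have hval := (hmem pr hprls).2.2
      have hpw := hpair
      rw [hsplit, List.pairwise_append] at hpw
      have := hpw.2.2 pr hpr (i, v) (by simp)
      rw [hval, hfst] at this
      exact this
    simp only [solutionLoop]
    rw [← hbi, ← hai]
    by_cases hcond : ai - bi - 1 ≥ k
    · rw [if_pos hcond]
      -- the break: v = solution_alt
      have hle1 : solution_alt stones k ≤ v := by
        apply alt_le stones k v (bi + 1) hk1 (by omega) (by omega)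
        intro m h1 h2
        rcases lt_trichotomy m i with h' | h' | h'
        · exact hSle m (hb4 m (by omega) h')
        · subst h'; omega
        · exact hSle m (ha4 m h' (by omega))
      have hle2 : v ≤ solution_alt stones k := by
        obtain ⟨w, hw0, hwk, _, hwbnd⟩ := alt_attained stones k hk1 hkN
        by_cases hall : ∀ m, w ≤ m → m < w + k → m ∈ p.map Prod.fst
        · exact absurd ⟨w, hw0, hwk, hall⟩ hnw
        · simp only [not_forall] at hall
          obtain ⟨m₀, h1, h2, h3⟩ := hall
          have hm0ls : (m₀, sval stones m₀) ∈ ls := hmem' m₀ (by omega) (by omega)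
          rw [hsplit] at hm0ls
          rcases List.mem_append.mp hm0ls with hin | hin
          · exact absurd (List.mem_map.mpr ⟨_, hin, rfl⟩) h3
          · rcases List.mem_cons.mp hin with he | hin
            · injection he with e1 e2
              rw [← e2]
              exact hwbnd m₀ h1 h2
            · have hpw := hpair
              rw [hsplit, List.pairwise_append] at hpw
              have hvle := (List.pairwise_cons.mp hpw.2.1).1 _ hin
              simp only at hvle
              exact le_trans hvle (hwbnd m₀ h1 h2)
      exact le_antisymm hle2 hle1
    · rw [if_neg hcond]
      -- prepare the shared pieces
      have hsplit' : ls = (p ++ [(i, v)]) ++ rest := by rw [hsplit]; simp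
      have hmapf : (p ++ [(i, v)]).map Prod.fst = p.map Prod.fst ++ [i] := by simp
      have hnw' : ¬ HasWin (p.map Prod.fst ++ [i]) (stones.length : Int) k := by
        rintro ⟨w, hw0, hwk, hwin⟩
        by_cases hiw : w ≤ i ∧ i < w + k
        · have hbw : bi < w := by
            by_contra hc
            rcases List.mem_append.mp (hwin bi (by omega) (by omega)) with h | h
            · exact hb3 h
            · simp only [List.mem_singleton] at h; omega
          have haw : w + k ≤ ai := by
            by_contra hc
            rcases List.mem_append.mp (hwin ai (by omega) (by omega)) with h | h
            · exact ha3 h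
            · simp only [List.mem_singleton] at h; omega
          exact hcond (by omega)
        · apply hnw
          refine ⟨w, hw0, hwk, fun m h1 h2 => ?_⟩
          rcases List.mem_append.mp (hwin m h1 h2) with h | h
          · exact h
          · simp only [List.mem_singleton] at h
            exact absurd ⟨by omega, by omega⟩ hiw
      by_cases hbneg : bi = -1
      · rw [if_pos hbneg]
        have haiN : ai < (stones.length : Int) := by omega
        have hinv' : LLInv (p.map Prod.fst ++ [i]) (PySem.List.pySetD before ai bi) after (stones.length : Int) := by
          apply step_inv (p.map Prod.fst) before after _ i bi ai _ _ hinv hi0 hiN hiS hbi hai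
          · intro j hj0 hjn
            exact getD_setD before ai j bi (by omega) (by omega) hj0 (by omega)
          · intro j hj0 hjn
            rw [if_neg (by omega)]
        rw [← hmapf] at hinv' hnw'
        exact ih (p ++ [(i, v)]) _ _ hsplit' (by rw [PySem.List.length_pySetD]; exact hlb) hla hinv' hnw'
      · rw [if_neg hbneg]
        have hbge : 0 ≤ bi := by omega
        by_cases haeq : ai = (stones.length : Int)
        · rw [if_pos haeq]
          have hinv' : LLInv (p.map Prod.fst ++ [i]) before (PySem.List.pySetD after bi ai) (stones.length : Int) := by
            apply step_inv (p.map Prod.fst) before after _ i bi ai _ _ hinv hi0 hiN hiS hbi hai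
            · intro j hj0 hjn
              rw [if_neg (by omega)]
            · intro j hj0 hjn
              exact getD_setD after bi j ai hbge (by omega) hj0 (by omega)
          rw [← hmapf] at hinv' hnw'
          exact ih (p ++ [(i, v)]) _ _ hsplit' hlb (by rw [PySem.List.length_pySetD]; exact hla) hinv' hnw'
        · rw [if_neg haeq]
          have haiN : ai < (stones.length : Int) := by omega
          have hinv' : LLInv (p.map Prod.fst ++ [i]) (PySem.List.pySetD before ai bi) (PySem.List.pySetD after bi ai) (stones.length : Int) := by
            apply step_inv (p.map Prod.fst) before after _ i bi ai _ _ hinv hi0 hiN hiS hbi hai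
            · intro j hj0 hjn
              exact getD_setD before ai j bi (by omega) (by omega) hj0 (by omega)
            · intro j hj0 hjn
              exact getD_setD after bi j ai hbge (by omega) hj0 (by omega)
          rw [← hmapf] at hinv' hnw'
          exact ih (p ++ [(i, v)]) _ _ hsplit' (by rw [PySem.List.length_pySetD]; exact hlb)
            (by rw [PySem.List.length_pySetD]; exact hla) hinv' hnw'

-- B at degenerate k (k ≤ 1) is min(stones)
theorem alt_min (stones : List Int) (k : Int) (hk : k ≤ 1) :
    solution_alt stones k = (PySem.List.min? stones (fun x => x)).getD 0 := by
  unfold solution_alt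
  rw [if_pos hk]

-- at k ≤ 1 the loop breaks on the first (smallest) stone
theorem loop_k0 (stones : List Int) (k : Int) (hk : k ≤ 1) (hne : stones ≠ []) :
    solutionLoop k (stones.length : Int)
      (PySem.List.sorted (PySem.List.enumerate stones 0) (fun p => p.2) false)
      (PySem.List.pyRange (-1) ((stones.length : Int) - 1) 1)
      (PySem.List.pyRange 1 ((stones.length : Int) + 1) 1)
      = (PySem.List.min? stones (fun x => x)).getD 0 := by
  set ls := PySem.List.sorted (PySem.List.enumerate stones 0) (fun p => p.2) false with hls
  have hlen : 0 < stones.length := List.length_pos_iff.mpr hne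
  obtain ⟨⟨i, v⟩, rest, hcons⟩ : ∃ hd tl, ls = hd :: tl := by
    cases hx : ls with
    | nil =>
      rw [hls, PySem.List.sorted_eq_nil_iff] at hx
      have := congrArg List.length hx
      rw [PySem.List.length_enumerate] at this
      simp at this
      exact absurd this hne
    | cons a b => exact ⟨a, b, rfl⟩
  have hperm : ls.Perm (PySem.List.enumerate stones 0) := PySem.List.sorted_perm _ _ _
  have hiin : (i, v) ∈ ls := by rw [hcons]; simp
  have hm := hperm.mem_iff.mp hiin
  rw [PySem.List.mem_enumerate_iff] at hm
  obtain ⟨kk, hkk, heq⟩ := hm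
  have hi0 : 0 ≤ i := by
    have := congrArg Prod.fst heq; simp at this; omega
  have hiN : i < (stones.length : Int) := by
    have := congrArg Prod.fst heq; simp at this; omega
  have hvmem : v ∈ stones := by
    have := congrArg Prod.snd heq; simp at this
    rw [this]; exact List.getElem_mem _
  rw [hcons]
  simp only [solutionLoop]
  have hlenb : (PySem.List.pyRange (-1) ((stones.length : Int) - 1) 1).length = stones.length := by
    rw [PySem.List.length_pyRange_one]; omega
  have hlena : (PySem.List.pyRange 1 ((stones.length : Int) + 1) 1).length = stones.length := by
    rw [PySem.List.length_pyRange_one]; omega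
  have hvb : PySem.List.pyGetD (PySem.List.pyRange (-1) ((stones.length : Int) - 1) 1) i 0 = i - 1 := by
    rw [PySem.List.pyGetD_eq_getElem _ _ hi0 (by rw [hlenb]; exact hiN),
        PySem.List.getElem_pyRange_one]
    omega
  have hva : PySem.List.pyGetD (PySem.List.pyRange 1 ((stones.length : Int) + 1) 1) i 0 = i + 1 := by
    rw [PySem.List.pyGetD_eq_getElem _ _ hi0 (by rw [hlena]; exact hiN),
        PySem.List.getElem_pyRange_one]
    omega
  rw [hvb, hva]
  rw [if_pos (by omega : i + 1 - (i - 1) - 1 ≥ k)]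
  obtain ⟨m, hmm⟩ : ∃ m, PySem.List.min? stones (fun x => x) = some m := by
    cases h : PySem.List.min? stones (fun x => x) with
    | none => exact absurd ((PySem.List.min?_eq_none_iff _ _).mp h) hne
    | some m => exact ⟨m, rfl⟩
  rw [hmm]
  simp only [Option.getD_some]
  apply le_antisymm
  · -- v ≤ m : v is the value of the head of the sorted enumeration
    have hmmem := PySem.List.min?_mem hmm
    obtain ⟨kk2, hkk2, he⟩ := List.mem_iff_getElem.mp hmmem
    have hpairmem : ((0 : Int) + (kk2 : Int), stones[kk2]) ∈ PySem.List.enumerate stones 0 :=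
      (PySem.List.mem_enumerate_iff _ _ _).mpr ⟨kk2, hkk2, rfl⟩
    have hsorted : PySem.List.sorted (PySem.List.enumerate stones 0) (fun p => p.2) = (i, v) :: rest := by
      rw [← hls]; exact hcons
    have hhead := PySem.List.key_head_sorted_le _ _ hsorted _ hpairmem
    simp only at hhead
    rw [he] at hhead
    exact hhead
  · exact PySem.List.min?_isMin hmm v hvmem

theorem main_branch (stones : List Int) (k : Int) (hk1 : 2 ≤ k)
    (hkN : k ≤ (stones.length : Int)) :
    solutionLoop k (stones.length : Int)
      (PySem.List.sorted (PySem.List.enumerate stones 0) (fun p => p.2) false)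
      (PySem.List.pyRange (-1) ((stones.length : Int) - 1) 1)
      (PySem.List.pyRange 1 ((stones.length : Int) + 1) 1) = solution_alt stones k := by
  set ls := PySem.List.sorted (PySem.List.enumerate stones 0) (fun p => p.2) false with hls
  have hperm : ls.Perm (PySem.List.enumerate stones 0) := PySem.List.sorted_perm _ _ _
  have hmem : ∀ pr ∈ ls, 0 ≤ pr.1 ∧ pr.1 < (stones.length : Int) ∧ pr.2 = sval stones pr.1 := by
    intro pr hpr
    have hm := hperm.mem_iff.mp hpr
    rw [PySem.List.mem_enumerate_iff] at hm
    obtain ⟨kk, hkk, rfl⟩ := hm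
    refine ⟨by omega, by push_cast; omega, ?_⟩
    simp only [sval]
    rw [PySem.List.pyGetD_eq_getElem _ _ (by omega) (by omega)]
    congr 1
    omega
  have hmem' : ∀ m : Int, 0 ≤ m → m < (stones.length : Int) → (m, sval stones m) ∈ ls := by
    intro m h0 hN
    rw [hperm.mem_iff, PySem.List.mem_enumerate_iff]
    refine ⟨m.toNat, by omega, ?_⟩
    have he1 : (0 : Int) + (m.toNat : Int) = m := by omega
    rw [he1]
    have he2 : sval stones m = stones[m.toNat]'(by omega) := by
      simp only [sval]
      rw [PySem.List.pyGetD_eq_getElem _ _ h0 hN]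
    rw [he2]
  have hnodup : (ls.map Prod.fst).Nodup := by
    rw [(hperm.map Prod.fst).nodup_iff, PySem.List.map_fst_enumerate]
    exact PySem.List.nodup_pyRange_one _ _
  have hpair : ls.Pairwise (fun a b => a.2 ≤ b.2) := PySem.List.sorted_pairwise _ _
  have hlenb : (PySem.List.pyRange (-1) ((stones.length : Int) - 1) 1).length = stones.length := by
    rw [PySem.List.length_pyRange_one]; omega
  have hlena : (PySem.List.pyRange 1 ((stones.length : Int) + 1) 1).length = stones.length := by
    rw [PySem.List.length_pyRange_one]; omega
  apply loop_eq stones k ls hk1 hkN hmem hmem' hnodup hpair ls [] _ _ (by simp) hlenb hlena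
  · -- initial invariant
    intro j hj0 hjN _
    have hvb : PySem.List.pyGetD (PySem.List.pyRange (-1) ((stones.length : Int) - 1) 1) j 0 = j - 1 := by
      rw [PySem.List.pyGetD_eq_getElem _ _ hj0 (by rw [hlenb]; exact hjN),
          PySem.List.getElem_pyRange_one]
      omega
    have hva : PySem.List.pyGetD (PySem.List.pyRange 1 ((stones.length : Int) + 1) 1) j 0 = j + 1 := by
      rw [PySem.List.pyGetD_eq_getElem _ _ hj0 (by rw [hlena]; exact hjN),
          PySem.List.getElem_pyRange_one]
      omega
    rw [hvb, hva]
    simp only [List.map_nil]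
    exact ⟨⟨by omega, by omega, by simp, fun m h1 h2 => by omega⟩,
           ⟨by omega, by omega, by simp, fun m h1 h2 => by omega⟩⟩
  · -- initially no window is removed
    rintro ⟨w, hw0, hwk, hwin⟩
    have := hwin w (le_refl w) (by omega)
    simp at this


-- ===== VERDICT (by name: the statement is the Claim_ definition above) =====
theorem solution_spec : Claim_equal_solution := by
  intro stones k _ hpre
  obtain ⟨hne, hkN⟩ := hpre
  have hlen : 0 < stones.length := List.length_pos_iff.mpr hne
  unfold Spec_solution solution
  by_cases h1 : k = 1
  · subst h1
    rw [if_pos rfl, alt_min stones 1 (le_refl 1)]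
  · rw [if_neg h1]
    by_cases hk0 : k ≤ 0
    · rw [if_neg (by omega : ¬ k = (stones.length : Int)), alt_min stones k (by omega)]
      rw [PySem.List.foldl_append_singleton_eq_self, List.nil_append]
      exact loop_k0 stones k (by omega) hne
    · by_cases hN : k = (stones.length : Int)
      · subst hN
        rw [if_pos rfl]
        exact (alt_kN stones (by omega)).symm
      · rw [if_neg hN]
        rw [PySem.List.foldl_append_singleton_eq_self, List.nil_append]
        exact main_branch stones k (by omega) hkN
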